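-- pv_equiv track=rewrite | github.com/srinivasagudi0/File-Generator | recipe_support.py | _normalize_style_list
-- ===== SOURCE A (Python) =====
-- def _normalize_style_list(raw_styles: object) -> list[str]:
--     if isinstance(raw_styles, str):
--         pieces = [part.strip().lower() for part in raw_styles.split(',') if part.strip()]
--     elif isinstance(raw_styles, list):
--         pieces = [str(part).strip().lower() for part in raw_styles if str(part).strip()]
--     else:
--         return []
--     return list(dict.fromkeys(pieces))
-- ===== SOURCE B (Python) =====
-- def _normalize_style_list(raw_styles: object) -> list[str]:
--     if isinstance(raw_styles, str):
--         norms = [part.strip().lower() for part in raw_styles.split(',')]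
--     elif isinstance(raw_styles, list):
--         norms = [str(part).strip().lower() for part in raw_styles]
--     else:
--         return []
--     # dedup by repeated filtering: take the first item, drop every later copy
--     # of it from the remainder, repeat; empties are skipped in the same loop
--     out = []
--     rest = norms
--     while rest:
--         h, rest = rest[0], rest[1:]
--         if h == '':
--             continue
--         out.append(h)
--         rest = [x for x in rest if x != h]
--     return out
-- ===== Notes on version B (the rewrite author's own statement) =====
-- stated objective: alternative
-- what changed: Replaces A's normalize-filter comprehension plus dict.fromkeys dedup with a repeated-filtering dedup: normalize everything, then loop taking the first remaining item, skipping empties, and deleting every later duplicate of the taken item from the remainder, so no dict or seen-set is kept.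
import Mathlib
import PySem

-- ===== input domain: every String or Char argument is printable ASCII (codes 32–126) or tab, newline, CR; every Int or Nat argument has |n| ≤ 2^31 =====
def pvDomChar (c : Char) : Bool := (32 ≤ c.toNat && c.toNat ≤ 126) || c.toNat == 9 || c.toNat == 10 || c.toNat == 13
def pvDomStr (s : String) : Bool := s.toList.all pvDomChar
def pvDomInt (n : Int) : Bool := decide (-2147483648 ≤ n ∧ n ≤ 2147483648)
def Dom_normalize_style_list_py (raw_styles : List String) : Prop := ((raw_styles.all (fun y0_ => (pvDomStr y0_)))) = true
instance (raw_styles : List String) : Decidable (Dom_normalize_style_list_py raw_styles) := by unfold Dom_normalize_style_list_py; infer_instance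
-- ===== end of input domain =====

-- B replaces A's dict.fromkeys dedup with a repeated-filtering dedup loop (take first
-- remaining item, drop its later copies, skip empties); same results, different algorithm
-- (objective: alternative).


-- ===== PORT A =====
-- A (list branch; str(part) = part on String inputs): comprehension = map over filter,
-- then list(dict.fromkeys(...)) = PySem.List.dedup.
def normalize_style_list_py (raw_styles : List String) : List String :=
  let pieces := (raw_styles.filter (fun part => PySem.Str.strip part ≠ "")).map
                  (fun part => PySem.Str.lower (PySem.Str.strip part))
  PySem.List.dedup pieces

-- ===== PORT B =====
-- B's while loop over the shrinking `rest`: take the head, skip it if empty, otherwise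
-- emit it and filter its later copies out of the remainder.
def normalize_style_list_py_alt_dedup : List String → List String
  | [] => []
  | h :: rest =>
    if h = "" then normalize_style_list_py_alt_dedup rest
    else h :: normalize_style_list_py_alt_dedup (rest.filter (fun x => x ≠ h))
termination_by l => l.length
decreasing_by
  · simp
  · simp only [List.length_unattach, List.length_cons]
    exact Nat.lt_succ_of_le (le_trans (List.length_filter_le _ _) (by simp))

def normalize_style_list_py_alt (raw_styles : List String) : List String :=
  normalize_style_list_py_alt_dedup
    (raw_styles.map (fun part => PySem.Str.lower (PySem.Str.strip part)))

-- ===== PRECONDITION & SPEC =====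
def Spec_normalize_style_list_py (raw_styles : List String) (out : List String) : Prop := out = normalize_style_list_py_alt raw_styles
instance (raw_styles : List String) (out : List String) : Decidable (Spec_normalize_style_list_py raw_styles out) := by unfold Spec_normalize_style_list_py; infer_instance

-- ===== CLAIM =====
def Claim_equal_normalize_style_list_py : Prop := ∀ (raw_styles : List String), Dom_normalize_style_list_py raw_styles → Spec_normalize_style_list_py raw_styles (normalize_style_list_py raw_styles)

-- ===== LEMMAS AND PROOFS =====

-- proof-only helper: plain repeated-filtering dedup (no empty-skip)
def pvDedup : List String → List String
  | [] => []
  | h :: rest => h :: pvDedup (rest.filter (fun x => x ≠ h))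
termination_by l => l.length
decreasing_by
  simp only [List.length_unattach, List.length_cons]
  exact Nat.lt_succ_of_le (le_trans (List.length_filter_le _ _) (by simp))

-- unfolding lemmas for the two well-founded recursions
theorem pvDedup_nil : pvDedup [] = [] := by rw [pvDedup.eq_def]

theorem pvDedup_cons (h : String) (t : List String) :
    pvDedup (h :: t) = h :: pvDedup (t.filter (fun x => x ≠ h)) := by
  rw [pvDedup.eq_def]

theorem pv_alt_dedup_cons (h : String) (t : List String) :
    normalize_style_list_py_alt_dedup (h :: t) =
      if h = "" then normalize_style_list_py_alt_dedup t
      else h :: normalize_style_list_py_alt_dedup (t.filter (fun x => x ≠ h)) := by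
  rw [normalize_style_list_py_alt_dedup.eq_def]

-- lowercasing does not change emptiness
theorem pv_lower_eq_empty_iff (s : String) : (PySem.Str.lower s = "") ↔ s = "" := by
  constructor <;> intro h
  · have := congrArg String.toList h
    simp [PySem.Str.toList_lower, PySem.Chars.lower] at this
    exact String.toList_inj.mp (by simp [this])
  · subst h; rfl

-- the Set.add fold (= dict.fromkeys) appends exactly the repeated-filtering dedup of
-- the elements not already seen
theorem pv_foldl_add_eq_pvDedup (t : List String) (s : PySem.Set String) :
    t.foldl PySem.Set.add s = s ++ pvDedup (t.filter (fun x => ¬ x ∈ s)) := by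
  induction t generalizing s with
  | nil => simp [pvDedup_nil]
  | cons h t ih =>
    simp only [List.foldl_cons, List.filter_cons]
    by_cases hm : h ∈ s
    · simp only [hm, not_true_eq_false, decide_false, Bool.false_eq_true, if_false,
        PySem.Set.add_of_mem hm]
      exact ih s
    · simp only [hm, not_false_eq_true, decide_true, if_true,
        PySem.Set.add_of_not_mem hm]
      rw [ih (s ++ [h])]
      rw [pvDedup_cons]
      rw [List.filter_filter, List.append_assoc, List.singleton_append]
      congr 2
      congr 1
      apply List.filter_congr
      intro x _
      by_cases h1 : x ∈ s <;> by_cases h2 : x = h <;> simp [h1, h2]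

-- PySem.List.dedup is the repeated-filtering dedup
theorem pv_dedup_eq_pvDedup (ys : List String) : PySem.List.dedup ys = pvDedup ys := by
  rw [PySem.List.dedup_eq_ofList, PySem.Set.ofList_eq_foldl,
      pv_foldl_add_eq_pvDedup ys []]
  simp

-- B's loop equals the plain repeated-filtering dedup of the nonempty elements
theorem pv_alt_dedup_eq (n : Nat) : ∀ (ys : List String), ys.length ≤ n →
    normalize_style_list_py_alt_dedup ys = pvDedup (ys.filter (fun x => x ≠ "")) := by
  induction n with
  | zero =>
    intro ys h
    rw [List.length_eq_zero_iff.mp (Nat.le_zero.mp h)]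
    rw [normalize_style_list_py_alt_dedup.eq_def]; simp [pvDedup_nil]
  | succ n ih =>
    intro ys hlen
    cases ys with
    | nil => rw [normalize_style_list_py_alt_dedup.eq_def]; simp [pvDedup_nil]
    | cons h t =>
      rw [pv_alt_dedup_cons, List.filter_cons]
      by_cases h0 : h = ""
      · simp only [h0, if_true, ne_eq, not_true_eq_false, decide_false,
          Bool.false_eq_true, if_false]
        exact ih t (Nat.le_of_succ_le_succ hlen)
      · simp only [h0, if_false, ne_eq, not_false_eq_true, decide_true, if_true]
        rw [ih (t.filter (fun x => x ≠ h))
              (Nat.le_trans (List.length_filter_le _ t) (Nat.le_of_succ_le_succ hlen))]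
        rw [pvDedup_cons]
        rw [List.filter_filter, List.filter_filter]
        congr 2
        apply List.filter_congr
        intro x _
        by_cases h1 : x = "" <;> by_cases h2 : x = h <;> simp [h1, h2]

-- ===== VERDICT =====
theorem normalize_style_list_py_spec : Claim_equal_normalize_style_list_py := by
  intro raw_styles _
  unfold Spec_normalize_style_list_py normalize_style_list_py normalize_style_list_py_alt
  rw [pv_alt_dedup_eq _ _ (Nat.le_refl _), pv_dedup_eq_pvDedup, List.filter_map]
  have h : raw_styles.filter
        ((fun x => decide (x ≠ "")) ∘ (fun part => PySem.Str.lower (PySem.Str.strip part))) =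
      raw_styles.filter (fun part => decide (PySem.Str.strip part ≠ "")) := by
    apply List.filter_congr
    intro x _
    simp [Function.comp, pv_lower_eq_empty_iff]
  rw [h]
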